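-- pv_equiv track=rewrite | github.com/Bobulator/deBruijnGraphAssembler | contigGenerator.py | find_branching_nodes
-- ===== SOURCE A (Python) =====
-- def find_branching_nodes(graph):
--     edge_counts = {}
--
--     for node, edges in graph.items():
--
--         if node not in edge_counts:
--             edge_counts[node] = [0, 0]
--
--         edge_counts[node][1] += len(edges)
--
--         for edge in edges:
--             if edge not in edge_counts:
--                 edge_counts[edge] = [0, 0]
--             edge_counts[edge][0] += 1
--
--     return [node for node, degrees in edge_counts.items() if not (degrees[0] == 1 and degrees[1] == 1)]
-- ===== SOURCE B (Python) =====
-- def find_branching_nodes(graph):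
--     # Brute force: no counter tables. Collect nodes in first-appearance order,
--     # then recount each node's degrees by scanning the graph directly.
--     seen = []
--     for node, edges in graph.items():
--         if node not in seen:
--             seen.append(node)
--         for e in edges:
--             if e not in seen:
--                 seen.append(e)
--     result = []
--     for n in seen:
--         indeg = sum(edges.count(n) for edges in graph.values())
--         outdeg = len(graph[n]) if n in graph else 0
--         if not (indeg == 1 and outdeg == 1):
--             result.append(n)
--     return result
-- ===== Notes on version B (the rewrite author's own statement) =====
-- stated objective: alternative
-- what changed: A makes one pass maintaining a fused dict of mutable [in,out] counter pairs and filters its items; B keeps no counters at all: it collects nodes in first-appearance order, then for each node recounts its in-degree by scanning every edge list and reads its out-degree straight from the dict, trading A's O(V+E) hash counting for a brute-force nested rescan.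
import Mathlib
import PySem

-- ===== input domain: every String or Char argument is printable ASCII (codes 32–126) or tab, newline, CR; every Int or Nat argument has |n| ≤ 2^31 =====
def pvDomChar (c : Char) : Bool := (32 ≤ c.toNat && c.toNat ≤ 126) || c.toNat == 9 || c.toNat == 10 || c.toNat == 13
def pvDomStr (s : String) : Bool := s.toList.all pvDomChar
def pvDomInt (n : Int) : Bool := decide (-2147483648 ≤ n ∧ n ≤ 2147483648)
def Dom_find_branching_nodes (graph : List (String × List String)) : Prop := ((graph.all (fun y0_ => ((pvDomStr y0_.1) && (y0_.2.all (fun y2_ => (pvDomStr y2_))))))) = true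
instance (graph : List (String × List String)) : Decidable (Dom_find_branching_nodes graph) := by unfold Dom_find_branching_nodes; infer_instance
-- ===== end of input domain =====

-- B keeps no counter tables: it lists nodes in first-appearance order, then recounts each
-- node's degrees by rescanning the graph — objective: alternative (brute-force rescan, not faster).


-- ===== PORT A =====
-- inner loop body: 'if edge not in edge_counts: edge_counts[edge] = [0,0]; edge_counts[edge][0] += 1'
def pvStepEdge (d : PySem.Dict String (Int × Int)) (e : String) : PySem.Dict String (Int × Int) :=
  let d := if d.contains e then d else d.insert e (0, 0)
  d.modify e (0, 0) (fun v => (v.1 + 1, v.2))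

-- outer loop body over one (node, edges) item
def pvStepNode (d : PySem.Dict String (Int × Int)) (p : String × List String) : PySem.Dict String (Int × Int) :=
  let d := if d.contains p.1 then d else d.insert p.1 (0, 0)
  let d := d.modify p.1 (0, 0) (fun v => (v.1, v.2 + (p.2.length : Int)))
  p.2.foldl pvStepEdge d

def find_branching_nodes (graph : List (String × List String)) : List String :=
  let ec := graph.foldl pvStepNode PySem.Dict.empty
  (ec.items.filter (fun q => !(q.2.1 == (1 : Int) && q.2.2 == (1 : Int)))).map (·.1)

-- ===== PORT B =====
-- 'if x not in seen: seen.append(x)' (branches written positively)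
def pvPushNew (acc : List String) (x : String) : List String :=
  if x ∈ acc then acc else acc ++ [x]

def find_branching_nodes_alt (graph : List (String × List String)) : List String :=
  let seen := graph.foldl (fun seen p => p.2.foldl pvPushNew (pvPushNew seen p.1)) []
  seen.foldl (fun result n =>
    let indeg := (graph.map (fun p => (p.2.count n : Int))).sum
    let outdeg : Int := match graph.find? (fun p => p.1 == n) with
      | some p => (p.2.length : Int)
      | none => 0
    if !(indeg == (1 : Int) && outdeg == (1 : Int)) then result ++ [n] else result) []

-- ===== PRECONDITION & SPEC =====
-- Pre_ requires distinct keys: 'graph' is a Python dict, so an association list with a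
-- duplicated key does not represent any input A accepts.
def Pre_find_branching_nodes (graph : List (String × List String)) : Prop :=
  (graph.map Prod.fst).Nodup
instance (graph : List (String × List String)) : Decidable (Pre_find_branching_nodes graph) := by
  unfold Pre_find_branching_nodes; infer_instance

def pvWitness_find_branching_nodes : (List (String × List String)) :=
  [("a", ["b", "c"]), ("b", ["c"]), ("c", [])]

def Spec_find_branching_nodes (graph : List (String × List String)) (out : List String) : Prop :=
  out = find_branching_nodes_alt graph
instance (graph : List (String × List String)) (out : List String) :
    Decidable (Spec_find_branching_nodes graph out) := by
  unfold Spec_find_branching_nodes; infer_instance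

-- ===== CLAIM (what is proved, stated in full; the proofs are below) =====
def Claim_equal_find_branching_nodes : Prop :=
  ∀ (graph : List (String × List String)), Dom_find_branching_nodes graph →
    Pre_find_branching_nodes graph →
    Spec_find_branching_nodes graph (find_branching_nodes graph)

-- ===== LEMMAS AND PROOFS =====

-- out-degree of k as A accumulates it: total length of the edge lists stored under key k
def pvOutSum (graph : List (String × List String)) (k : String) : Int :=
  ((graph.filter (fun p => p.1 = k)).map (fun p => (p.2.length : Int))).sum

theorem pvStepEdge_getD (d : PySem.Dict String (Int × Int)) (e k : String) :
    (pvStepEdge d e).getD k (0, 0) =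
      if k = e then ((d.getD k (0, 0)).1 + 1, (d.getD k (0, 0)).2) else d.getD k (0, 0) := by
  unfold pvStepEdge
  by_cases h : d.contains e = true
  · simp [h, PySem.Dict.getD_modify]
    split_ifs with hk
    · subst hk; rfl
    · rfl
  · simp only [Bool.not_eq_true] at h
    simp [h, PySem.Dict.getD_modify, PySem.Dict.getD_insert]
    split_ifs with hk
    · subst hk; rw [PySem.Dict.getD_of_not_contains d _ h]; rfl
    · rfl

theorem pvStepEdge_foldl_getD (es : List String) (d : PySem.Dict String (Int × Int)) (k : String) :
    (es.foldl pvStepEdge d).getD k (0, 0) =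
      ((d.getD k (0, 0)).1 + (es.count k : Int), (d.getD k (0, 0)).2) := by
  induction es generalizing d with
  | nil => simp
  | cons e t ih =>
    simp only [List.foldl_cons, ih, pvStepEdge_getD, List.count_cons]
    by_cases hk : k = e
    · simp [hk, eq_comm]; ring
    · simp [hk, Ne.symm hk]

theorem pvStepNode_getD (d : PySem.Dict String (Int × Int)) (p : String × List String)
    (k : String) :
    (pvStepNode d p).getD k (0, 0) =
      ((d.getD k (0, 0)).1 + (p.2.count k : Int),
       (d.getD k (0, 0)).2 + (if k = p.1 then (p.2.length : Int) else 0)) := by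
  unfold pvStepNode
  rw [pvStepEdge_foldl_getD]
  by_cases h : d.contains p.1 = true
  · simp [h, PySem.Dict.getD_modify]
    split_ifs with hk
    · subst hk; simp
    · simp
  · simp only [Bool.not_eq_true] at h
    simp [h, PySem.Dict.getD_modify, PySem.Dict.getD_insert]
    split_ifs with hk
    · subst hk; rw [PySem.Dict.getD_of_not_contains d _ h]; simp
    · simp

theorem pvA_foldl_getD (graph : List (String × List String))
    (d : PySem.Dict String (Int × Int)) (k : String) :
    (graph.foldl pvStepNode d).getD k (0, 0) =
      ((d.getD k (0, 0)).1 + ((graph.flatMap (·.2)).count k : Int),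
       (d.getD k (0, 0)).2 + pvOutSum graph k) := by
  induction graph generalizing d with
  | nil => simp [pvOutSum]
  | cons p t ih =>
    simp only [List.foldl_cons, ih, pvStepNode_getD, List.flatMap_cons, List.count_append]
    rw [Prod.mk.injEq]
    constructor
    · push_cast; ring
    · unfold pvOutSum
      by_cases hk : k = p.1
      · simp [hk, eq_comm]; ring
      · simp [hk, Ne.symm hk]

theorem pvStepEdge_keys (d : PySem.Dict String (Int × Int)) (e : String) :
    (pvStepEdge d e).keys = pvPushNew d.keys e := by
  unfold pvStepEdge pvPushNew
  by_cases h : d.contains e = true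
  · rw [if_pos h, PySem.Dict.keys_modify, PySem.Dict.keys_insert_of_contains _ _ h,
      if_pos ((PySem.Dict.contains_iff_mem_keys d e).mp h)]
  · simp only [Bool.not_eq_true] at h
    rw [if_neg (by simp [h]), PySem.Dict.keys_modify,
      PySem.Dict.keys_insert_of_contains _ _ (PySem.Dict.contains_insert_self d e (0,0)),
      PySem.Dict.keys_insert_of_not_contains _ _ h,
      if_neg (fun hm => by simp [(PySem.Dict.contains_iff_mem_keys d e).mpr hm] at h)]

theorem pvStepNode_keys (d : PySem.Dict String (Int × Int)) (p : String × List String) :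
    (pvStepNode d p).keys = p.2.foldl pvPushNew (pvPushNew d.keys p.1) := by
  unfold pvStepNode
  have h1 : ((if d.contains p.1 then d else d.insert p.1 (0, 0)).modify p.1 (0, 0)
      (fun v => (v.1, v.2 + (p.2.length : Int)))).keys = pvPushNew d.keys p.1 := by
    by_cases h : d.contains p.1 = true
    · rw [if_pos h, PySem.Dict.keys_modify, PySem.Dict.keys_insert_of_contains _ _ h,
        pvPushNew, if_pos ((PySem.Dict.contains_iff_mem_keys d p.1).mp h)]
    · simp only [Bool.not_eq_true] at h
      rw [if_neg (by simp [h]), PySem.Dict.keys_modify,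
        PySem.Dict.keys_insert_of_contains _ _ (PySem.Dict.contains_insert_self d p.1 (0,0)),
        PySem.Dict.keys_insert_of_not_contains _ _ h, pvPushNew,
        if_neg (fun hm => by simp [(PySem.Dict.contains_iff_mem_keys d p.1).mpr hm] at h)]
  rw [show ∀ (d0 : PySem.Dict String (Int × Int)), (p.2.foldl pvStepEdge d0).keys
        = p.2.foldl pvPushNew d0.keys from ?_, h1]
  intro d0
  induction p.2 generalizing d0 with
  | nil => rfl
  | cons e t ih => simp only [List.foldl_cons, ih, pvStepEdge_keys]

theorem pvA_foldl_keys (graph : List (String × List String))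
    (d : PySem.Dict String (Int × Int)) :
    (graph.foldl pvStepNode d).keys =
      graph.foldl (fun acc p => p.2.foldl pvPushNew (pvPushNew acc p.1)) d.keys := by
  induction graph generalizing d with
  | nil => rfl
  | cons p t ih => simp only [List.foldl_cons, ih, pvStepNode_keys]

theorem pvPushNew_nodup (acc : List String) (x : String) (h : acc.Nodup) :
    (pvPushNew acc x).Nodup := by
  unfold pvPushNew; split_ifs with hm
  · exact h
  · simpa using List.Nodup.append h (List.nodup_singleton x) (by simpa using hm)

theorem pvOrder_nodup (graph : List (String × List String)) (acc : List String)
    (h : acc.Nodup) :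
    (graph.foldl (fun acc p => p.2.foldl pvPushNew (pvPushNew acc p.1)) acc).Nodup := by
  induction graph generalizing acc with
  | nil => exact h
  | cons p t ih =>
    refine ih _ ?_
    have : ∀ (es : List String) (a : List String), a.Nodup → (es.foldl pvPushNew a).Nodup := by
      intro es
      induction es with
      | nil => exact fun a ha => ha
      | cons e u ihe => exact fun a ha => ihe _ (pvPushNew_nodup a e ha)
    exact this _ _ (pvPushNew_nodup acc p.1 h)

-- B's recounted in-degree is A's: the per-list counts sum to the count over the flattened edges
theorem pvIndeg_eq (graph : List (String × List String)) (k : String) :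
    ((graph.map (fun p => ((p.2.count k : Nat) : Int))).sum) =
      (((graph.flatMap (·.2)).count k : Nat) : Int) := by
  induction graph with
  | nil => simp
  | cons p t ih => simp [List.flatMap_cons, List.count_append, ih]

-- B's dict lookup reads back A's accumulated out-degree, given distinct keys
theorem pvOutdeg_eq (graph : List (String × List String)) (k : String)
    (hnd : (graph.map Prod.fst).Nodup) :
    (match graph.find? (fun p => p.1 == k) with
      | some p => ((p.2.length : Nat) : Int)
      | none => (0 : Int)) = pvOutSum graph k := by
  induction graph with
  | nil => simp [pvOutSum]
  | cons p t ih =>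
    simp only [List.map_cons, List.nodup_cons] at hnd
    by_cases hk : p.1 = k
    · have hfilt : t.filter (fun p' => decide (p'.1 = k)) = [] := by
        rw [List.filter_eq_nil_iff]
        intro a ha hqa
        simp only [decide_eq_true_eq] at hqa
        exact hnd.1 (hk ▸ hqa ▸ List.mem_map.mpr ⟨a, ha, rfl⟩)
      simp [hk, pvOutSum, hfilt]
    · have := ih hnd.2
      simp only [List.find?_cons, show (p.1 == k) = false by simpa using hk]
      rw [this]
      unfold pvOutSum
      simp [hk]

theorem find_branching_nodes_eq (graph : List (String × List String))
    (hnd : (graph.map Prod.fst).Nodup) :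
    find_branching_nodes graph = find_branching_nodes_alt graph := by
  simp only [find_branching_nodes, find_branching_nodes_alt]
  set order := graph.foldl (fun acc p => p.2.foldl pvPushNew (pvPushNew acc p.1)) [] with horder
  have hkeysA : (graph.foldl pvStepNode PySem.Dict.empty).keys = order := by
    rw [pvA_foldl_keys, PySem.Dict.keys_empty]
  have hknd : (graph.foldl pvStepNode PySem.Dict.empty).keys.Nodup := by
    rw [hkeysA]; exact pvOrder_nodup graph [] List.nodup_nil
  -- B's append loop is a filter over 'order'
  rw [PySem.List.foldl_append_if_eq_filter]
  rw [PySem.Dict.items_eq_map_keys _ hknd (0, 0), hkeysA, List.filter_map, List.map_map]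
  simp only [Function.comp_def]
  rw [List.map_id']
  apply List.filter_congr
  intro x _
  rw [pvA_foldl_getD]
  simp only [PySem.Dict.getD_empty]
  rw [← pvIndeg_eq, ← pvOutdeg_eq _ _ hnd]
  simp

-- ===== VERDICT (by name: the statement is the Claim_ definition above) =====
theorem find_branching_nodes_spec : Claim_equal_find_branching_nodes := by
  intro graph _ hpre
  unfold Spec_find_branching_nodes
  exact find_branching_nodes_eq graph hpre
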